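-- pv_equiv track=rewrite | github.com/A-NextSlide/nextslide | apps/backend/services/unified_font_service.py | _determine_context
-- ===== SOURCE A (Python) =====
-- from typing import Dict, List, Optional, Tuple
--
-- def _determine_context(title: str, vibe: str, keywords: List[str] = None, audience: str = None) -> Dict:
--     """Determine the presentation context"""
--
--     title_lower = title.lower() if title else ''
--     vibe_lower = vibe.lower() if vibe else ''
--     keywords_text = ' '.join(keywords).lower() if keywords else ''
--     audience_lower = audience.lower() if audience else ''
--     all_text = f"{title_lower} {vibe_lower} {keywords_text} {audience_lower}"
--
--     # Determine type
--     if any(word in all_text for word in ['corporate', 'business', 'professional', 'formal', 'enterprise']):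
--         pres_type = 'corporate'
--     elif any(word in all_text for word in ['startup', 'pitch', 'investor', 'funding']):
--         pres_type = 'startup'
--     elif any(word in all_text for word in ['creative', 'design', 'art', 'portfolio']):
--         pres_type = 'creative'
--     elif any(word in all_text for word in ['tech', 'technology', 'software', 'digital']):
--         pres_type = 'tech'
--     elif any(word in all_text for word in ['education', 'teaching', 'learning', 'school']):
--         pres_type = 'educational'
--     else:
--         pres_type = 'general'
--
--     # Determine style
--     if vibe_lower in ['professional', 'formal', 'serious', 'corporate']:
--         style = 'professional'
--     elif vibe_lower in ['modern', 'innovative', 'tech', 'futuristic']: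
--         style = 'modern'
--     elif vibe_lower in ['fun', 'playful', 'casual', 'friendly']:
--         style = 'playful'
--     elif vibe_lower in ['elegant', 'sophisticated', 'luxury', 'premium']:
--         style = 'elegant'
--     elif vibe_lower in ['creative', 'artistic', 'bold', 'unique']:
--         style = 'creative'
--     else:
--         style = 'balanced'
--
--     return {
--         'type': pres_type,
--         'style': style,
--         'vibe': vibe_lower
--     }
-- ===== SOURCE B (Python) =====
-- from typing import Dict, List, Optional, Tuple
--
-- # Every (substring-word, type-label) pair, flattened; priority resolved afterwards.
-- WORD_TYPES = [
--     ('corporate', 'corporate'), ('business', 'corporate'), ('professional', 'corporate'),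
--     ('formal', 'corporate'), ('enterprise', 'corporate'),
--     ('startup', 'startup'), ('pitch', 'startup'), ('investor', 'startup'), ('funding', 'startup'),
--     ('creative', 'creative'), ('design', 'creative'), ('art', 'creative'), ('portfolio', 'creative'),
--     ('tech', 'tech'), ('technology', 'tech'), ('software', 'tech'), ('digital', 'tech'),
--     ('education', 'educational'), ('teaching', 'educational'), ('learning', 'educational'),
--     ('school', 'educational'),
-- ]
--
-- TYPE_ORDER = ['corporate', 'startup', 'creative', 'tech', 'educational']
--
-- # Flat vibe-word -> style dictionary (the option lists are pairwise disjoint).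
-- STYLE_OF = {
--     'professional': 'professional', 'formal': 'professional', 'serious': 'professional',
--     'corporate': 'professional',
--     'modern': 'modern', 'innovative': 'modern', 'tech': 'modern', 'futuristic': 'modern',
--     'fun': 'playful', 'playful': 'playful', 'casual': 'playful', 'friendly': 'playful',
--     'elegant': 'elegant', 'sophisticated': 'elegant', 'luxury': 'elegant', 'premium': 'elegant',
--     'creative': 'creative', 'artistic': 'creative', 'bold': 'creative', 'unique': 'creative',
-- }
--
-- def _determine_context(title: str, vibe: str, keywords: List[str] = None, audience: str = None) -> Dict:
--     vibe_lower = vibe.lower() if vibe else ''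
--     all_text = ' '.join([
--         title.lower() if title else '',
--         vibe_lower,
--         ' '.join(keywords).lower() if keywords else '',
--         audience.lower() if audience else '',
--     ])
--     matched = [label for word, label in WORD_TYPES if word in all_text]
--     pres_type = next((label for label in TYPE_ORDER if label in matched), 'general')
--     style = STYLE_OF.get(vibe_lower, 'balanced')
--     return {'type': pres_type, 'style': style, 'vibe': vibe_lower}
-- ===== Notes on version B (the rewrite author's own statement) =====
-- stated objective: alternative
-- what changed: Replaced A's two if/elif chains with data: type is computed by exhaustively collecting labels from a flat (word, label) pair list and resolving with a priority list, and style by a single lookup in a flat vibe-word -> style dictionary instead of ordered membership tests.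
import Mathlib
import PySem

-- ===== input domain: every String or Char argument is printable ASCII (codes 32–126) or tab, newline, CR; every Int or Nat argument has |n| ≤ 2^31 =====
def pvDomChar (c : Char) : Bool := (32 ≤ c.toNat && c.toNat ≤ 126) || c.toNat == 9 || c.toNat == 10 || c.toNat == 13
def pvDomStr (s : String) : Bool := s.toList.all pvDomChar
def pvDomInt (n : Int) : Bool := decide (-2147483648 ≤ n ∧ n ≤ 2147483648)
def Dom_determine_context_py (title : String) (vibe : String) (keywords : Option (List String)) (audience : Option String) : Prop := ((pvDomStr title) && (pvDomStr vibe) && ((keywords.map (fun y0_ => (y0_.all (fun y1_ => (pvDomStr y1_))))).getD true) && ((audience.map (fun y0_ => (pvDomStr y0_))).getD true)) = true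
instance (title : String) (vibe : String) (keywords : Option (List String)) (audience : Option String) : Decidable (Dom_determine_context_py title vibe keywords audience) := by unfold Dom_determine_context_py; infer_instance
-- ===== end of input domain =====

-- B flattens A's if/elif chains into data: a flat (word, type-label) pair list matched exhaustively
-- then resolved by a priority list, and a flat vibe-word -> style dictionary looked up once (idiomatic; same behaviour).


-- ===== PORT A =====
def determine_context_py (title : String) (vibe : String) (keywords : Option (List String)) (audience : Option String) : List (String × String) :=
  let title_lower := if title ≠ "" then PySem.Str.lower title else ""
  let vibe_lower := if vibe ≠ "" then PySem.Str.lower vibe else ""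
  let keywords_text := match keywords with
    | some ks => if ks ≠ [] then PySem.Str.lower (PySem.Str.join " " ks) else ""
    | none => ""
  let audience_lower := match audience with
    | some a => if a ≠ "" then PySem.Str.lower a else ""
    | none => ""
  let all_text := PySem.Str.join " " [title_lower, vibe_lower, keywords_text, audience_lower]
  let pres_type :=
    if ["corporate", "business", "professional", "formal", "enterprise"].any (fun w => PySem.Str.isIn w all_text) then "corporate"
    else if ["startup", "pitch", "investor", "funding"].any (fun w => PySem.Str.isIn w all_text) then "startup"
    else if ["creative", "design", "art", "portfolio"].any (fun w => PySem.Str.isIn w all_text) then "creative"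
    else if ["tech", "technology", "software", "digital"].any (fun w => PySem.Str.isIn w all_text) then "tech"
    else if ["education", "teaching", "learning", "school"].any (fun w => PySem.Str.isIn w all_text) then "educational"
    else "general"
  let style :=
    if ["professional", "formal", "serious", "corporate"].contains vibe_lower then "professional"
    else if ["modern", "innovative", "tech", "futuristic"].contains vibe_lower then "modern"
    else if ["fun", "playful", "casual", "friendly"].contains vibe_lower then "playful"
    else if ["elegant", "sophisticated", "luxury", "premium"].contains vibe_lower then "elegant"
    else if ["creative", "artistic", "bold", "unique"].contains vibe_lower then "creative"
    else "balanced"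
  [("type", pres_type), ("style", style), ("vibe", vibe_lower)]

-- ===== PORT B =====
-- flat (substring-word, type-label) pairs, matched exhaustively; priority resolved afterwards
def pvWordTypes : List (String × String) :=
  [("corporate", "corporate"), ("business", "corporate"), ("professional", "corporate"),
   ("formal", "corporate"), ("enterprise", "corporate"),
   ("startup", "startup"), ("pitch", "startup"), ("investor", "startup"), ("funding", "startup"),
   ("creative", "creative"), ("design", "creative"), ("art", "creative"), ("portfolio", "creative"),
   ("tech", "tech"), ("technology", "tech"), ("software", "tech"), ("digital", "tech"),
   ("education", "educational"), ("teaching", "educational"), ("learning", "educational"),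
   ("school", "educational")]

def pvTypeOrder : List String := ["corporate", "startup", "creative", "tech", "educational"]

-- flat vibe-word -> style dictionary (the option lists are pairwise disjoint)
def pvStyleOf : PySem.Dict String String := PySem.Dict.mk
  [("professional", "professional"), ("formal", "professional"), ("serious", "professional"),
   ("corporate", "professional"),
   ("modern", "modern"), ("innovative", "modern"), ("tech", "modern"), ("futuristic", "modern"),
   ("fun", "playful"), ("playful", "playful"), ("casual", "playful"), ("friendly", "playful"),
   ("elegant", "elegant"), ("sophisticated", "elegant"), ("luxury", "elegant"), ("premium", "elegant"),
   ("creative", "creative"), ("artistic", "creative"), ("bold", "creative"), ("unique", "creative")]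

def determine_context_py_alt (title : String) (vibe : String) (keywords : Option (List String)) (audience : Option String) : List (String × String) :=
  let vibe_lower := if vibe ≠ "" then PySem.Str.lower vibe else ""
  let all_text := PySem.Str.join " "
    [if title ≠ "" then PySem.Str.lower title else "",
     vibe_lower,
     (match keywords with
      | some ks => if ks ≠ [] then PySem.Str.lower (PySem.Str.join " " ks) else ""
      | none => ""),
     (match audience with
      | some a => if a ≠ "" then PySem.Str.lower a else ""
      | none => "")]
  let matched := (pvWordTypes.filter (fun p => PySem.Str.isIn p.1 all_text)).map Prod.snd
  let pres_type := (pvTypeOrder.find? (fun l => matched.contains l)).getD "general"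
  let style := pvStyleOf.getD vibe_lower "balanced"
  [("type", pres_type), ("style", style), ("vibe", vibe_lower)]

-- ===== PRECONDITION & SPEC =====
def Spec_determine_context_py (title : String) (vibe : String) (keywords : Option (List String)) (audience : Option String) (out : List (String × String)) : Prop := out = determine_context_py_alt title vibe keywords audience
instance (title : String) (vibe : String) (keywords : Option (List String)) (audience : Option String) (out : List (String × String)) : Decidable (Spec_determine_context_py title vibe keywords audience out) := by unfold Spec_determine_context_py; infer_instance

-- ===== CLAIM (what is proved, stated in full; the proofs are below) =====
def Claim_equal_determine_context_py : Prop := ∀ (title : String) (vibe : String) (keywords : Option (List String)) (audience : Option String), Dom_determine_context_py title vibe keywords audience → Spec_determine_context_py title vibe keywords audience (determine_context_py title vibe keywords audience)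

-- ===== LEMMAS AND PROOFS =====

-- B's type stage equals A's chain, for any text
theorem pvTypeStage_eq (t : String) :
    ((pvTypeOrder.find? (fun l =>
        ((pvWordTypes.filter (fun p => PySem.Str.isIn p.1 t)).map Prod.snd).contains l)).getD "general")
    =
    (if ["corporate", "business", "professional", "formal", "enterprise"].any (fun w => PySem.Str.isIn w t) then "corporate"
     else if ["startup", "pitch", "investor", "funding"].any (fun w => PySem.Str.isIn w t) then "startup"
     else if ["creative", "design", "art", "portfolio"].any (fun w => PySem.Str.isIn w t) then "creative"
     else if ["tech", "technology", "software", "digital"].any (fun w => PySem.Str.isIn w t) then "tech"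
     else if ["education", "teaching", "learning", "school"].any (fun w => PySem.Str.isIn w t) then "educational"
     else "general") := by
  simp only [pvTypeOrder, List.find?, List.contains_eq_mem, pvWordTypes,
    List.any_cons, List.any_nil, Bool.or_false]
  split_ifs <;> simp_all

-- B's style stage equals A's chain, for any vibe_lower
theorem pvStyleStage_eq (v : String) :
    pvStyleOf.getD v "balanced"
    =
    (if ["professional", "formal", "serious", "corporate"].contains v then "professional"
     else if ["modern", "innovative", "tech", "futuristic"].contains v then "modern"
     else if ["fun", "playful", "casual", "friendly"].contains v then "playful"
     else if ["elegant", "sophisticated", "luxury", "premium"].contains v then "elegant"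
     else if ["creative", "artistic", "bold", "unique"].contains v then "creative"
     else "balanced") := by
  by_cases h : v ∈ (["professional","formal","serious","corporate","modern","innovative","tech",
      "futuristic","fun","playful","casual","friendly","elegant","sophisticated","luxury",
      "premium","creative","artistic","bold","unique"] : List String)
  · fin_cases h <;> rfl
  · simp only [List.mem_cons, List.not_mem_nil, or_false, not_or] at h
    obtain ⟨h1,h2,h3,h4,h5,h6,h7,h8,h9,h10,h11,h12,h13,h14,h15,h16,h17,h18,h19,h20⟩ := h
    simp [pvStyleOf, PySem.Dict.getD_eq_get?_getD, PySem.Dict.get?,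
      Ne.symm h1, Ne.symm h2, Ne.symm h3, Ne.symm h4, Ne.symm h5, Ne.symm h6, Ne.symm h7,
      Ne.symm h8, Ne.symm h9, Ne.symm h10, Ne.symm h11, Ne.symm h12, Ne.symm h13, Ne.symm h14,
      Ne.symm h15, Ne.symm h16, Ne.symm h17, Ne.symm h18, Ne.symm h19, Ne.symm h20,
      h1, h2, h3, h4, h5, h6, h7, h8, h9, h10, h11, h12, h13, h14, h15, h16, h17, h18, h19, h20]

-- ===== VERDICT (by name: the statement is the Claim_ definition above) =====
theorem determine_context_py_spec : Claim_equal_determine_context_py := by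
  intro title vibe keywords audience _
  unfold Spec_determine_context_py determine_context_py determine_context_py_alt
  simp only [pvTypeStage_eq, pvStyleStage_eq]
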